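-- pv_equiv track=rewrite | github.com/0otico/EP_grafos | grafos.py | graphQ
-- ===== SOURCE A (Python) =====
-- def graphQ(g): #verifica se g é um grafo
--
--     if type(g)==list: #g tem de ser uma lista
--         res=True
--         i=0
--         while i<len(g) and res:
--             res=(type(g[i])==list)
--             i+=1
--
--         if res: #os elementos de g têm de ser listas
--             i=0
--             while i<len(g) and res:
--                 res=(len(g[i])<=len(g))
--                 i+=1
--
--             if res: #as listas de g não podem ter mais elementos do que o número de vértices de g
--                 i=0
--                 while i<len(g) and res:
--                     j=0
--                     while j<len(g[i]) and res:
--                         res=(type(g[i][j])==int)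
--                         j+=1
--                     i+=1
--
--                 if res: #os elementos das listas de w têm de ser inteiros
--                     i=0
--                     while i<len(g) and res:
--                         j=0
--                         while j<len(g[i]) and res:
--                             res=(g[i][j]>0 and g[i][j]<=len(g) and g[i][j]!=i+1)
--                             #o g[i][j]!=i+1 serve para garantir que os vértices não ligam a si mesmos
--                             j+=1
--                         i+=1
--
--                     if res: #os elementos das listas de g têm de estar entre 1 e len(g) (para representar vértices)
--                         i=0
--                         while i<len(g) and res:
--                             j=0
--                             while j<len(g[i]) and res:
--                                 n=g[i][j]
--                                 res=(i+1 in g[n-1])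
--                                 j+=1
--                             i+=1
--
--                         return res #se n está na lista do vértice i+1 (g[i]), então i+1 tem de estar na lista de n (g[n-1])
--
--                     else:
--                         return False
--                 else:
--                     return False
--             else:
--                 return False
--         else:
--             return False
--     else:
--         return False
-- ===== SOURCE B (Python) =====
-- def graphQ(g):
--     if type(g) != list:
--         return False
--     n = len(g)
--     if any(type(r) != list or len(r) > n for r in g):
--         return False
--     if any(type(x) != int or not (0 < x <= n) or x == i + 1
--            for i, r in enumerate(g) for x in r):
--         return False
--     # dense boolean adjacency matrix; valid iff it equals its transpose
--     M = [[(j + 1) in r for j in range(n)] for r in g]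
--     return all(M[i][j] == M[j][i] for i in range(n) for j in range(n))
-- ===== Notes on version B (the rewrite author's own statement) =====
-- stated objective: faster
-- what changed: Replaces A's five staged early-exit while-loop passes and its per-edge reverse-lookup symmetry check (i+1 in g[x-1]) with two fused any() validation passes plus a dense n-by-n boolean adjacency matrix built once and compared with its transpose over all index pairs.
import Mathlib
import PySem

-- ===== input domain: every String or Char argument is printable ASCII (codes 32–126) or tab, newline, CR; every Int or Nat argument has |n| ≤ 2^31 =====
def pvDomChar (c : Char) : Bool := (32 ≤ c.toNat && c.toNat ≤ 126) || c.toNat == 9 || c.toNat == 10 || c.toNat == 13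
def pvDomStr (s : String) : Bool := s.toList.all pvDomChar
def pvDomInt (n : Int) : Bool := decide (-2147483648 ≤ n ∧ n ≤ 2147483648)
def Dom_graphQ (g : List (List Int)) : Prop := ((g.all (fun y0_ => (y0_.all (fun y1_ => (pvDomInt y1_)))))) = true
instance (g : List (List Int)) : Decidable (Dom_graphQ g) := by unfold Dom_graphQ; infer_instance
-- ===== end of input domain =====

-- B replaces A's five staged early-exit while-loops and per-edge reverse lookup with fused
-- validation passes plus a dense boolean adjacency matrix compared with its transpose.

-- ===== PORT A =====
-- Python's 'i=0; while i<len and res: res = body; i+=1; … return res' loop shape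
-- (fuel = remaining iteration bound, structural so the kernel can evaluate it).
def pvWloop (f : Nat → Bool → Bool) (fuel n i : Nat) (res : Bool) : Bool :=
  match fuel with
  | 0 => res
  | Nat.succ m => if i < n && res then pvWloop f m n (i+1) (f i res) else res

def graphQ (g : List (List Int)) : Bool :=
  -- type(g)==list: always true for List (List Int)
  let n := g.length
  let r1 := pvWloop (fun _ _ => true) n n 0 true        -- type(g[i])==list: always true
  if r1 then
    let r2 := pvWloop (fun i _ => decide ((g.getD i []).length ≤ n)) n n 0 r1
    if r2 then
      let r3 := pvWloop (fun i res =>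
        pvWloop (fun _ _ => true) (g.getD i []).length (g.getD i []).length 0 res) n n 0 r2   -- type(g[i][j])==int: always true
      if r3 then
        let r4 := pvWloop (fun i res =>
          pvWloop (fun j _ =>
            let x := (g.getD i []).getD j 0
            decide (0 < x ∧ x ≤ (n : Int) ∧ x ≠ (i : Int) + 1)) (g.getD i []).length (g.getD i []).length 0 res) n n 0 r3
        if r4 then
          pvWloop (fun i res =>
            pvWloop (fun j _ =>
              let x := (g.getD i []).getD j 0
              ((PySem.List.pyGet? g (x - 1)).getD []).contains ((i : Int) + 1))
              (g.getD i []).length (g.getD i []).length 0 res) n n 0 r4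
        else false
      else false
    else false
  else false

-- ===== PORT B =====
def graphQ_alt (g : List (List Int)) : Bool :=
  -- type checks of Source B are always true for List (List Int)
  let n := g.length
  if g.any (fun r => decide (r.length > n)) then false
  else if (PySem.List.enumerate g).any (fun p =>
      p.2.any (fun x => !(decide (0 < x) && decide (x ≤ (n : Int))) || decide (x = p.1 + 1))) then false
  else
    -- M = [[(j+1) in r for j in range(n)] for r in g]
    let M : List (List Bool) := g.map (fun r => (List.range n).map (fun j => r.contains ((j : Int) + 1)))
    (List.range n).all (fun i => (List.range n).all (fun j =>
      ((M.getD i []).getD j false) == ((M.getD j []).getD i false)))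

-- ===== PRECONDITION & SPEC =====
def Spec_graphQ (g : List (List Int)) (out : Bool) : Prop := out = graphQ_alt g
instance (g : List (List Int)) (out : Bool) : Decidable (Spec_graphQ g out) := by unfold Spec_graphQ; infer_instance

-- ===== CLAIM (what is proved, stated in full; the proofs are below) =====
def Claim_equal_graphQ : Prop := ∀ (g : List (List Int)), Dom_graphQ g → Spec_graphQ g (graphQ g)

-- ===== LEMMAS AND PROOFS =====

lemma pvWloop_false (f : Nat → Bool → Bool) (fuel n i : Nat) : pvWloop f fuel n i false = false := by
  cases fuel <;> simp [pvWloop]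

lemma pvWloop_eq_aux (f : Nat → Bool → Bool) (fuel : Nat) :
    ∀ (n i : Nat), n ≤ i + fuel →
      pvWloop f fuel n i true = decide (∀ k, i ≤ k → k < n → f k true = true) := by
  induction fuel with
  | zero =>
    intro n i h
    simp only [pvWloop]
    symm; simp only [decide_eq_true_eq]
    intro k h1 h2; omega
  | succ m ih =>
    intro n i h
    simp only [pvWloop]
    by_cases hin : i < n
    · simp only [hin, decide_true, Bool.true_and, if_true]
      cases hp : f i true with
      | false =>
        rw [pvWloop_false]; symm
        simp only [decide_eq_false_iff_not]
        intro hall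
        have := hall i (le_refl i) hin
        simp [hp] at this
      | true =>
        rw [ih n (i+1) (by omega)]
        simp only [decide_eq_decide]
        constructor
        · intro hall k h1 h2
          rcases Nat.eq_or_lt_of_le h1 with rfl | hlt
          · exact hp
          · exact hall k hlt h2
        · intro hall k h1 h2
          exact hall k (by omega) h2
    · rw [if_neg (by simp [hin])]
      symm; simp only [decide_eq_true_eq]
      intro k h1 h2; omega

-- every loop in the port starts at i = 0 with fuel = n
lemma pvWloop_eq (f : Nat → Bool → Bool) (n : Nat) :
    pvWloop f n n 0 true = decide (∀ k, k < n → f k true = true) := by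
  rw [pvWloop_eq_aux f n n 0 (by omega)]
  simp

lemma pvWloop_init_decide (f : Nat → Bool → Bool) (fuel n i : Nat) (P : Prop) [Decidable P] :
    pvWloop f fuel n i (decide P) = (decide P && pvWloop f fuel n i true) := by
  by_cases h : P <;> simp [h, pvWloop_false]

lemma pv_row (g : List (List Int)) (k : Nat) (hk : k < g.length) : g[k]?.getD [] = g[k] := by
  simp [List.getElem?_eq_getElem hk]

lemma pvWloop_init_and (f : Nat → Bool → Bool) (fuel n i : Nat) (a b : Bool) :
    pvWloop f fuel n i (a && b) = (a && (b && pvWloop f fuel n i true)) := by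
  cases a <;> cases b <;> simp [pvWloop_false]

lemma pv_P2_iff (g : List (List Int)) :
    (∀ k < g.length, (g[k]?.getD []).length ≤ g.length) ↔ ∀ x ∈ g, x.length ≤ g.length := by
  constructor
  · intro h x hx
    obtain ⟨k, hk, rfl⟩ := List.mem_iff_getElem.mp hx
    have := h k hk; rwa [pv_row g k hk] at this
  · intro h k hk
    rw [pv_row g k hk]; exact h _ (List.getElem_mem hk)

-- the range/no-self-loop pass: B's row-wise form ↔ A's index form
lemma pv_P4_iff (g : List (List Int)) :
    (∀ (a : Int) (b : List Int), (a, b) ∈ PySem.List.enumerate g →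
        ∀ x ∈ b, (0 < x ∧ x ≤ (g.length : Int)) ∧ ¬x = a + 1) ↔
      (∀ k < g.length, ∀ j < (g[k]?.getD []).length,
        0 < (g[k]?.getD [])[j]?.getD 0 ∧ (g[k]?.getD [])[j]?.getD 0 ≤ (g.length : Int) ∧
          ¬(g[k]?.getD [])[j]?.getD 0 = (k : Int) + 1) := by
  constructor
  · intro h k hk j hj
    rw [pv_row g k hk] at hj ⊢
    have hmem : ((k : Int), g[k]) ∈ PySem.List.enumerate g :=
      (PySem.List.mem_enumerate_iff _ _ _).mpr ⟨k, hk, by simp⟩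
    have := h _ _ hmem (g[k][j]?.getD 0)
      (by rw [List.getElem?_eq_getElem hj]; exact List.getElem_mem hj)
    tauto
  · intro h a b hab x hx
    obtain ⟨k, hk, hp⟩ := (PySem.List.mem_enumerate_iff _ _ _).mp hab
    obtain ⟨ha, hb⟩ := Prod.ext_iff.mp hp
    simp only at ha hb; subst hb
    obtain ⟨j, hj, rfl⟩ := List.mem_iff_getElem.mp hx
    have := h k hk j (by rw [pv_row g k hk]; exact hj)
    rw [pv_row g k hk, List.getElem?_eq_getElem hj] at this
    simp only [Option.getD_some] at this
    refine ⟨⟨this.1, this.2.1⟩, ?_⟩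
    rw [ha]; simpa using this.2.2

-- B's matrix entry at (i,j), both < n, is the membership bit (j+1) ∈ g[i]  (stated in the
-- simp-normal form the verdict proof sees)
lemma pv_M_entry (g : List (List Int)) (i j : Nat) (hi : i < g.length) (hj : j < g.length) :
    ((Option.map (fun r => List.map (fun j : Nat => decide ((j : Int) + 1 ∈ r)) (List.range g.length)) g[i]?).getD [])[j]?.getD false
      = decide ((j : Int) + 1 ∈ g[i]?.getD []) := by
  rw [List.getElem?_eq_getElem hi]
  simp [hj]

-- the symmetry pass: A's per-edge reverse lookup ↔ B's matrix-transpose equality, under the range pass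
lemma pv_sym_iff (g : List (List Int))
    (h4 : ∀ k < g.length, ∀ j < (g[k]?.getD []).length,
      0 < (g[k]?.getD [])[j]?.getD 0 ∧ (g[k]?.getD [])[j]?.getD 0 ≤ (g.length : Int) ∧
        ¬(g[k]?.getD [])[j]?.getD 0 = (k : Int) + 1) :
    (∀ k < g.length, ∀ j < (g[k]?.getD []).length,
        (k : Int) + 1 ∈ (PySem.List.pyGet? g ((g[k]?.getD [])[j]?.getD 0 - 1)).getD []) ↔
      (∀ i < g.length, ∀ j < g.length,
        (((j : Int) + 1) ∈ g[i]?.getD [] ↔ ((i : Int) + 1) ∈ g[j]?.getD [])) := by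
  have hget : ∀ x : Int, 0 < x → x ≤ (g.length : Int) →
      (PySem.List.pyGet? g (x - 1)).getD [] = g[(x - 1).toNat]?.getD [] := by
    intro x h1 h2
    have hx : x - 1 = (((x - 1).toNat : Nat) : Int) := by omega
    have hlt : (x - 1).toNat < g.length := by omega
    rw [hx]; simp
  have dir : ∀ i, i < g.length → ∀ j, j < g.length → ((j : Int) + 1) ∈ g[i]?.getD [] →
      (∀ k < g.length, ∀ p < (g[k]?.getD []).length,
        (k : Int) + 1 ∈ (PySem.List.pyGet? g ((g[k]?.getD [])[p]?.getD 0 - 1)).getD []) →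
      ((i : Int) + 1) ∈ g[j]?.getD [] := by
    intro i hi j hj hmem h
    rw [pv_row g i hi] at hmem
    obtain ⟨p, hp, hpe⟩ := List.mem_iff_getElem.mp hmem
    have hp' : p < (g[i]?.getD []).length := by rw [pv_row g i hi]; exact hp
    have := h i hi p hp'
    have hval : (g[i]?.getD [])[p]?.getD 0 = (j : Int) + 1 := by
      rw [pv_row g i hi, List.getElem?_eq_getElem hp]; simpa using hpe
    rw [hval] at this
    have h0 : (0 : Int) < (j : Int) + 1 := by omega
    have h1 : (j : Int) + 1 ≤ (g.length : Int) := by omega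
    have hjq : ((j : Int) + 1 - 1) = ((j : Nat) : Int) := by omega
    rw [hget _ h0 h1, hjq] at this
    simpa [Int.toNat_natCast] using this
  constructor
  · intro h i hi j hj
    exact ⟨fun hm => dir i hi j hj hm h, fun hm => dir j hj i hi hm h⟩
  · intro hsym k hk p hp
    have hr := h4 k hk p hp
    have hp' : p < g[k].length := by rwa [pv_row g k hk] at hp
    set x := (g[k]?.getD [])[p]?.getD 0 with hx
    have hxm : x ∈ g[k]?.getD [] := by
      rw [hx, pv_row g k hk, List.getElem?_eq_getElem hp']
      exact List.getElem_mem hp'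
    have hjn : (x - 1).toNat < g.length := by omega
    have hxj : x = (((x - 1).toNat : Nat) : Int) + 1 := by omega
    have hmem : (((x - 1).toNat : Nat) : Int) + 1 ∈ g[k]?.getD [] := by rwa [← hxj]
    have := (hsym k hk (x - 1).toNat hjn).mp hmem
    rw [hget x hr.1 hr.2.1]
    exact this

-- ===== VERDICT (by name: the statement is the Claim_ definition above) =====
theorem graphQ_spec : Claim_equal_graphQ := by
  intro g _
  unfold Spec_graphQ
  rw [Bool.eq_iff_iff]
  simp [graphQ, graphQ_alt, pvWloop_init_decide, pvWloop_init_and, pvWloop_eq]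
  constructor
  · rintro ⟨h2, ⟨-, h4⟩, -, -, h5⟩
    refine ⟨(pv_P2_iff g).mp h2, (pv_P4_iff g).mpr h4, ?_⟩
    intro i hi j hj
    rw [pv_M_entry g i j hi hj, pv_M_entry g j i hj hi]
    exact decide_eq_decide.mpr ((pv_sym_iff g h4).mp h5 i hi j hj)
  · rintro ⟨hm2, hm4, hms⟩
    have h2 := (pv_P2_iff g).mpr hm2
    have h4 := (pv_P4_iff g).mp hm4
    refine ⟨h2, ⟨h2, h4⟩, h2, h4, ?_⟩
    refine (pv_sym_iff g h4).mpr ?_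
    intro i hi j hj
    have := hms i hi j hj
    rw [pv_M_entry g i j hi hj, pv_M_entry g j i hj hi] at this
    exact decide_eq_decide.mp this
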